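-- pv_equiv track=rewrite | github.com/kienlucy08/HelloFresh | hellofresh-recipe-extractor/driver.py | consolidate_tag
-- ===== SOURCE A (Python) =====
-- action_functions = {
--     "assemble" : ["turn on", "turn off", "serve", "arrange", "turn"],
--     "basic" : ["move", "remove", "mix", "add", "reduce", "lower", "drain", "repeat"],
--     "cook" : ["cook in pot", "cook in pan", "toast", "cook with lid", "cook in oven", "cook in microwave", "cook"],
--     "cut" : ["cut", "grate"],
--     "prep" : ["wash", "dry", "preheat", "squeeze", "pick", "discard", "shape", "core"],
-- }
--
-- tag_consolidation = {
--     "move" : ["arrange", "place", "return", "move", "pour", "take", "reserve", "scoop", "put", "set aside", "transfer"],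
--     "mix" : ["stir", "whisk", "toss", "combine"],
--     "add" : ["sprinkle", "season", "increase", "scatter", "spread", "put", "garnish", "top", "drizzle", "fill",
--              "lay", "brush"],
--     "add utensil" : ["line", "put"],
--     "add lid" : ["cover"],
--     "cook in pot" : ["boil", "simmer", "melt", "sear"],
--     "cook in pan" : ["heat", "grill", "simmer", "melt", "sear"],
--     "cook in oven" : ["broil", "bake", "roast"],
--     "cook with lid" : ["steam"],
--     "cut" : ["trim", "cut", "mince", "chop", "break", "dice", "slice", "halve", "break up", "tear"],
--     "divide" : ["divide"],
--     "grate" : ["zest", "shave"],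
--     "wash" : ["rinse"],
--     "dry" : ["pat"],
--     "squeeze" : ["cinch"],
--     "move (prep)" : ["discard"],
--     "shape" : ["form"]
-- }
--
-- def consolidate_tag(tag):
--     for key in tag_consolidation:
--         if tag == key:
--             return key
--         for word in tag_consolidation[key]:
--             if tag == word:
--                 return key
--     for key in action_functions:
--         for word in action_functions[key]:
--             if tag == word:
--                 return tag
--     return "not found"
-- ===== SOURCE B (Python) =====
-- # One flat hand-written lookup table: each tag or synonym maps directly to its
-- # category (first-occurrence precedence of the original nested tables baked in),
-- # so each call is a single dict lookup.
-- _LOOKUP = {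
--     'move': 'move', 'arrange': 'move', 'place': 'move', 'return': 'move',
--     'pour': 'move', 'take': 'move', 'reserve': 'move', 'scoop': 'move',
--     'put': 'move', 'set aside': 'move', 'transfer': 'move',
--     'mix': 'mix', 'stir': 'mix', 'whisk': 'mix', 'toss': 'mix', 'combine': 'mix',
--     'add': 'add', 'sprinkle': 'add', 'season': 'add', 'increase': 'add',
--     'scatter': 'add', 'spread': 'add', 'garnish': 'add', 'top': 'add',
--     'drizzle': 'add', 'fill': 'add', 'lay': 'add', 'brush': 'add',
--     'add utensil': 'add utensil', 'line': 'add utensil',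
--     'add lid': 'add lid', 'cover': 'add lid',
--     'cook in pot': 'cook in pot', 'boil': 'cook in pot', 'simmer': 'cook in pot',
--     'melt': 'cook in pot', 'sear': 'cook in pot',
--     'cook in pan': 'cook in pan', 'heat': 'cook in pan', 'grill': 'cook in pan',
--     'cook in oven': 'cook in oven', 'broil': 'cook in oven',
--     'bake': 'cook in oven', 'roast': 'cook in oven',
--     'cook with lid': 'cook with lid', 'steam': 'cook with lid',
--     'cut': 'cut', 'trim': 'cut', 'mince': 'cut', 'chop': 'cut', 'break': 'cut',
--     'dice': 'cut', 'slice': 'cut', 'halve': 'cut', 'break up': 'cut', 'tear': 'cut',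
--     'divide': 'divide',
--     'grate': 'grate', 'zest': 'grate', 'shave': 'grate',
--     'wash': 'wash', 'rinse': 'wash',
--     'dry': 'dry', 'pat': 'dry',
--     'squeeze': 'squeeze', 'cinch': 'squeeze',
--     'move (prep)': 'move (prep)', 'discard': 'move (prep)',
--     'shape': 'shape', 'form': 'shape',
--     'turn on': 'turn on', 'turn off': 'turn off', 'serve': 'serve', 'turn': 'turn',
--     'remove': 'remove', 'reduce': 'reduce', 'lower': 'lower', 'drain': 'drain',
--     'repeat': 'repeat', 'toast': 'toast', 'cook in microwave': 'cook in microwave',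
--     'cook': 'cook', 'preheat': 'preheat', 'pick': 'pick', 'core': 'core',
-- }
--
-- def consolidate_tag(tag):
--     return _LOOKUP.get(tag, "not found")
-- ===== Notes on version B (the rewrite author's own statement) =====
-- stated objective: simpler
-- what changed: Replaces the per-call nested scan over the two nested tables by a single O(1) lookup in one flat hand-written tag->category dict with the original first-occurrence precedence baked in.
import Mathlib
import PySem

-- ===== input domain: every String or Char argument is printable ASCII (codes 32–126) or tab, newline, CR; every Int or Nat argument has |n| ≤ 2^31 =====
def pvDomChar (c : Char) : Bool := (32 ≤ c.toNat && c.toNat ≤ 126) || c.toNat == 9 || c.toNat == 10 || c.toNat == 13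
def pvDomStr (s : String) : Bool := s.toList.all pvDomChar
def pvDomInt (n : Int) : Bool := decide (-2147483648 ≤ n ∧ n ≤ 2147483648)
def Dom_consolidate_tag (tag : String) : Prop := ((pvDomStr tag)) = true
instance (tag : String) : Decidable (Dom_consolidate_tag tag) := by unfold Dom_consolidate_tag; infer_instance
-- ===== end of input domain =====

-- B replaces A's per-call nested scan over the two nested tables by a single lookup in one flat
-- hand-written tag→category dict with the first-occurrence precedence baked in; objective: simpler.

-- ===== PORT A =====
-- A's module-level nested tables
def tagConsolidation : List (String × List String) :=
  [("move", ["arrange", "place", "return", "move", "pour", "take", "reserve", "scoop", "put", "set aside", "transfer"]),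
   ("mix", ["stir", "whisk", "toss", "combine"]),
   ("add", ["sprinkle", "season", "increase", "scatter", "spread", "put", "garnish", "top", "drizzle", "fill", "lay", "brush"]),
   ("add utensil", ["line", "put"]),
   ("add lid", ["cover"]),
   ("cook in pot", ["boil", "simmer", "melt", "sear"]),
   ("cook in pan", ["heat", "grill", "simmer", "melt", "sear"]),
   ("cook in oven", ["broil", "bake", "roast"]),
   ("cook with lid", ["steam"]),
   ("cut", ["trim", "cut", "mince", "chop", "break", "dice", "slice", "halve", "break up", "tear"]),
   ("divide", ["divide"]),
   ("grate", ["zest", "shave"]),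
   ("wash", ["rinse"]),
   ("dry", ["pat"]),
   ("squeeze", ["cinch"]),
   ("move (prep)", ["discard"]),
   ("shape", ["form"])]

def actionFunctions : List (String × List String) :=
  [("assemble", ["turn on", "turn off", "serve", "arrange", "turn"]),
   ("basic", ["move", "remove", "mix", "add", "reduce", "lower", "drain", "repeat"]),
   ("cook", ["cook in pot", "cook in pan", "toast", "cook with lid", "cook in oven", "cook in microwave", "cook"]),
   ("cut", ["cut", "grate"]),
   ("prep", ["wash", "dry", "preheat", "squeeze", "pick", "discard", "shape", "core"])]

-- inner 'for word in …: if tag == word: return key'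
def wordScan (tag : String) : List String → Bool
  | [] => false
  | w :: ws => if tag == w then true else wordScan tag ws

-- first loop over tag_consolidation
def scanTC (tag : String) : List (String × List String) → Option String
  | [] => none
  | (k, ws) :: rest =>
      if tag == k then some k
      else if wordScan tag ws then some k
      else scanTC tag rest

-- second loop over action_functions
def scanAF (tag : String) : List (String × List String) → Bool
  | [] => false
  | (_, ws) :: rest => if wordScan tag ws then true else scanAF tag rest

def consolidate_tag (tag : String) : String :=
  match scanTC tag tagConsolidation with
  | some k => k
  | none => if scanAF tag actionFunctions then tag else "not found"

-- ===== PORT B =====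
-- B's flat hand-written dict literal _LOOKUP
def flatLookup : PySem.Dict String String := PySem.Dict.ofList
  [("move", "move"), ("arrange", "move"), ("place", "move"),
   ("return", "move"), ("pour", "move"), ("take", "move"),
   ("reserve", "move"), ("scoop", "move"), ("put", "move"),
   ("set aside", "move"), ("transfer", "move"), ("mix", "mix"),
   ("stir", "mix"), ("whisk", "mix"), ("toss", "mix"),
   ("combine", "mix"), ("add", "add"), ("sprinkle", "add"),
   ("season", "add"), ("increase", "add"), ("scatter", "add"),
   ("spread", "add"), ("garnish", "add"), ("top", "add"),
   ("drizzle", "add"), ("fill", "add"), ("lay", "add"),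
   ("brush", "add"), ("add utensil", "add utensil"), ("line", "add utensil"),
   ("add lid", "add lid"), ("cover", "add lid"), ("cook in pot", "cook in pot"),
   ("boil", "cook in pot"), ("simmer", "cook in pot"), ("melt", "cook in pot"),
   ("sear", "cook in pot"), ("cook in pan", "cook in pan"), ("heat", "cook in pan"),
   ("grill", "cook in pan"), ("cook in oven", "cook in oven"), ("broil", "cook in oven"),
   ("bake", "cook in oven"), ("roast", "cook in oven"), ("cook with lid", "cook with lid"),
   ("steam", "cook with lid"), ("cut", "cut"), ("trim", "cut"),
   ("mince", "cut"), ("chop", "cut"), ("break", "cut"),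
   ("dice", "cut"), ("slice", "cut"), ("halve", "cut"),
   ("break up", "cut"), ("tear", "cut"), ("divide", "divide"),
   ("grate", "grate"), ("zest", "grate"), ("shave", "grate"),
   ("wash", "wash"), ("rinse", "wash"), ("dry", "dry"),
   ("pat", "dry"), ("squeeze", "squeeze"), ("cinch", "squeeze"),
   ("move (prep)", "move (prep)"), ("discard", "move (prep)"), ("shape", "shape"),
   ("form", "shape"), ("turn on", "turn on"), ("turn off", "turn off"),
   ("serve", "serve"), ("turn", "turn"), ("remove", "remove"),
   ("reduce", "reduce"), ("lower", "lower"), ("drain", "drain"),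
   ("repeat", "repeat"), ("toast", "toast"), ("cook in microwave", "cook in microwave"),
   ("cook", "cook"), ("preheat", "preheat"), ("pick", "pick"),
   ("core", "core")]

def consolidate_tag_alt (tag : String) : String :=
  PySem.Dict.getD flatLookup tag "not found"

-- ===== PRECONDITION & SPEC =====
def Spec_consolidate_tag (tag : String) (out : String) : Prop := out = consolidate_tag_alt tag
instance (tag : String) (out : String) : Decidable (Spec_consolidate_tag tag out) := by unfold Spec_consolidate_tag; infer_instance

-- ===== CLAIM (what is proved, stated in full; the proofs are below) =====
def Claim_equal_consolidate_tag : Prop := ∀ (tag : String), Dom_consolidate_tag tag → Spec_consolidate_tag tag (consolidate_tag tag)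

-- ===== LEMMAS AND PROOFS =====

-- proof helper: the keys of B's flat table (a closed computable list)
def tableKeys : List String := PySem.Dict.keys flatLookup

theorem wordScan_false_of_not_mem (tag : String) (ws : List String) (h : tag ∉ ws) :
    wordScan tag ws = false := by
  induction ws with
  | nil => rfl
  | cons w rest ih =>
      simp only [wordScan]
      rw [if_neg, ih (fun hm => h (List.mem_cons_of_mem _ hm))]
      simp only [beq_iff_eq]
      exact fun he => h (he ▸ List.mem_cons_self)

theorem scanTC_none (tag : String) (l : List (String × List String))
    (h : ∀ p ∈ l, tag ≠ p.1 ∧ tag ∉ p.2) : scanTC tag l = none := by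
  induction l with
  | nil => rfl
  | cons p rest ih =>
      obtain ⟨k, ws⟩ := p
      obtain ⟨h1, h2⟩ := h _ List.mem_cons_self
      simp only [scanTC]
      rw [if_neg (by simpa using h1), wordScan_false_of_not_mem tag ws h2]
      simpa using ih (fun q hq => h q (List.mem_cons_of_mem _ hq))

theorem scanAF_false (tag : String) (l : List (String × List String))
    (h : ∀ p ∈ l, tag ∉ p.2) : scanAF tag l = false := by
  induction l with
  | nil => rfl
  | cons p rest ih =>
      simp only [scanAF]
      rw [wordScan_false_of_not_mem tag p.2 (h _ List.mem_cons_self)]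
      simpa using ih (fun q hq => h q (List.mem_cons_of_mem _ hq))

-- every key and word of A's two tables occurs among B's table keys (a finite check)
set_option maxRecDepth 40000 in
theorem tables_sub :
    (∀ p ∈ tagConsolidation, p.1 ∈ tableKeys ∧ ∀ w ∈ p.2, w ∈ tableKeys) ∧
    (∀ p ∈ actionFunctions, ∀ w ∈ p.2, w ∈ tableKeys) := by decide

set_option maxRecDepth 40000 in
theorem agree (tag : String) : consolidate_tag tag = consolidate_tag_alt tag := by
  by_cases h : tag ∈ tableKeys
  · fin_cases h <;> rfl
  · unfold consolidate_tag consolidate_tag_alt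
    rw [scanTC_none tag tagConsolidation
        (fun p hp => ⟨fun he => h (he ▸ (tables_sub.1 p hp).1),
                      fun hm => h ((tables_sub.1 p hp).2 _ hm)⟩)]
    rw [scanAF_false tag actionFunctions (fun p hp hm => h (tables_sub.2 p hp _ hm))]
    have hc : PySem.Dict.contains flatLookup tag = false := by
      rw [PySem.Dict.contains_eq_decide_mem_keys]
      simpa [tableKeys] using h
    rw [PySem.Dict.getD_of_not_contains]
    · rfl
    · exact hc

-- ===== VERDICT (by name: the statement is the Claim_ definition above) =====
theorem consolidate_tag_spec : Claim_equal_consolidate_tag :=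
  fun tag _ => agree tag
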